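-- pv_equiv track=rewrite | github.com/entrepidea/projects | python/algo/leetcode/levels/easy/fancy_string.py | fancy
-- ===== SOURCE A (Python) =====
-- from typing import List
--
-- def fancy(text : List[str]) -> str:
-- 	if len(text)<3:
-- 		return ""
-- 	ret = []
-- 	ret.append(text[0])
-- 	for i in range(1,len(text)-1):
-- 		if text[i] == text[i-1] and text[i] == text[i+1]:
-- 			continue
-- 		ret.append(text[i])
-- 	ret.append(text[len(text)-1])
-- 	return ''.join(ret)
-- ===== SOURCE B (Python) =====
-- from typing import List
--
-- def fancy(text : List[str]) -> str:
--     if len(text) < 3: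
--         return ""
--     out = []
--     i, n = 0, len(text)
--     while i < n:
--         j = i + 1
--         while j < n and text[j] == text[i]:
--             j += 1
--         out.append(text[i] * min(2, j - i))
--         i = j
--     return ''.join(out)
-- ===== Notes on version B (the rewrite author's own statement) =====
-- stated objective: alternative
-- what changed: Replaces A's per-index comparison of each middle element with both neighbours by a single run-length scan over maximal runs of equal elements, emitting each run capped at two copies.
import Mathlib
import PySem

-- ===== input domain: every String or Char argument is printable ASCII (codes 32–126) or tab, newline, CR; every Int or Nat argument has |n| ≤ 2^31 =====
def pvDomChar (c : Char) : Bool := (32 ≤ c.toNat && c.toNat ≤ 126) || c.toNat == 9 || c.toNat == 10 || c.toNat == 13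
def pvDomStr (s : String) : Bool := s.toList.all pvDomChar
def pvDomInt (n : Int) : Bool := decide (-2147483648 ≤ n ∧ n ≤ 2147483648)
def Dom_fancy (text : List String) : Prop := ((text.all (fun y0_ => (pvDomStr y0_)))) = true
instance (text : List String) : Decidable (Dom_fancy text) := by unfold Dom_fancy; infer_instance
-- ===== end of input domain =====

-- B replaces A's per-index neighbour comparison by a run-length scan that caps each run
-- of equal elements at two; same return value on every input (objective: alternative).

-- ===== PORT A =====
def fancy (text : List String) : String :=
  if text.length < 3 then "" else
    let ret : List String := []
    let ret := ret ++ [PySem.List.pyGetD text 0 ""]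
    let ret := (PySem.List.pyRange 1 ((text.length : Int) - 1) 1).foldl
      (fun acc i =>
        if PySem.List.pyGetD text i "" = PySem.List.pyGetD text (i - 1) "" ∧
           PySem.List.pyGetD text i "" = PySem.List.pyGetD text (i + 1) ""
        then acc
        else acc ++ [PySem.List.pyGetD text i ""]) ret
    let ret := ret ++ [PySem.List.pyGetD text ((text.length : Int) - 1) ""]
    PySem.Str.join "" ret

-- ===== PORT B =====
-- text[i] * k  (Python string repetition)
def strMul (s : String) (k : Nat) : String := PySem.Str.join "" (List.replicate k s)

-- B's outer while loop: one step per maximal run of equal elements (the inner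
-- 'while j < n and text[j] == text[i]' scan is the takeWhile/dropWhile split)
def fancyRuns : List String → List String
  | [] => []
  | x :: xs =>
      strMul x (min 2 (1 + (xs.takeWhile (fun y => y == x)).length)) ::
      fancyRuns (xs.dropWhile (fun y => y == x))
  termination_by l => l.length
  decreasing_by exact Nat.lt_succ_of_le (List.length_dropWhile_le _ _)

def fancy_alt (text : List String) : String :=
  if text.length < 3 then "" else PySem.Str.join "" (fancyRuns text)

-- ===== PRECONDITION & SPEC =====
def Spec_fancy (text : List String) (out : String) : Prop := out = fancy_alt text
instance (text : List String) (out : String) : Decidable (Spec_fancy text out) := by unfold Spec_fancy; infer_instance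

-- ===== CLAIM (what is proved, stated in full; the proofs are below) =====
def Claim_equal_fancy : Prop := ∀ (text : List String), Dom_fancy text → Spec_fancy text (fancy text)

-- ===== LEMMAS AND PROOFS =====

-- the elements A's middle loop keeps, read structurally: p is the previous element;
-- a non-final element is dropped iff it equals both neighbours; the final one is kept
def selAux (p : String) : List String → List String
  | [] => []
  | [c] => [c]
  | c :: d :: rest => (if p = c ∧ c = d then [] else [c]) ++ selAux c (d :: rest)

theorem chars_join_empty (ls : List (List Char)) : PySem.Chars.join [] ls = ls.flatten := by
  induction ls with
  | nil => simp [PySem.Chars.join_nil]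
  | cons a t ih =>
    cases t with
    | nil => simp [PySem.Chars.join, List.intercalate]
    | cons b r => rw [PySem.Chars.join_cons_cons]; simp [ih]

theorem joinS_cons (s : String) (l : List String) :
    PySem.Str.join "" (s :: l) = s ++ PySem.Str.join "" l := by
  apply String.toList_inj.mp; simp [PySem.Str.toList_join, chars_join_empty]

theorem joinS_nil : PySem.Str.join "" ([] : List String) = "" := by
  apply String.toList_inj.mp; simp [PySem.Str.toList_join]

theorem joinS_append (l1 l2 : List String) :
    PySem.Str.join "" (l1 ++ l2) = PySem.Str.join "" l1 ++ PySem.Str.join "" l2 := by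
  apply String.toList_inj.mp; simp [PySem.Str.toList_join, chars_join_empty]

-- A's loop from index k+1, together with the trailing unconditional append, is selAux
theorem loopA (t : List String) :
    ∀ (m k : Nat) (acc : List String), t.length = k + 2 + m →
    (PySem.List.pyRange ((k : Int) + 1) ((t.length : Int) - 1) 1).foldl
      (fun acc i =>
        if PySem.List.pyGetD t i "" = PySem.List.pyGetD t (i - 1) "" ∧
           PySem.List.pyGetD t i "" = PySem.List.pyGetD t (i + 1) ""
        then acc
        else acc ++ [PySem.List.pyGetD t i ""]) acc
      ++ [PySem.List.pyGetD t ((t.length : Int) - 1) ""]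
    = acc ++ selAux (t.getD k "") (t.drop (k + 1)) := by
  intro m
  induction m with
  | zero =>
    intro k acc h
    rw [PySem.List.pyRange_one_eq_nil (by omega : ((t.length : Int) - 1) ≤ (k : Int) + 1)]
    have h1 : k + 1 < t.length := by omega
    have hd : t.drop (k + 1) = [t.getD (k+1) ""] := by
      rw [List.drop_eq_getElem_cons h1]
      have : t.drop (k + 2) = [] := by apply List.drop_eq_nil_of_le; omega
      rw [this, List.getD_eq_getElem _ _ h1]
    rw [hd]
    have he : ((t.length : Int) - 1) = ((k + 1 : Nat) : Int) := by omega
    rw [he, PySem.List.pyGetD_natCast]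
    simp [selAux]
  | succ m ih =>
    intro k acc h
    have h1 : k + 1 < t.length := by omega
    have h2 : k + 2 < t.length := by omega
    rw [PySem.List.pyRange_one_cons (by omega : (k : Int) + 1 < (t.length : Int) - 1)]
    rw [List.foldl_cons]
    have e0 : (k : Int) + 1 - 1 = ((k : Nat) : Int) := by omega
    have e2 : (k : Int) + 1 + 1 = ((k + 2 : Nat) : Int) := by omega
    have e1 : (k : Int) + 1 = ((k + 1 : Nat) : Int) := by omega
    rw [e0, e2, e1]
    simp only [PySem.List.pyGetD_natCast]
    have hiff : (t.getD (k+1) "" = t.getD k "" ∧ t.getD (k+1) "" = t.getD (k+2) "")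
        ↔ (t.getD k "" = t.getD (k+1) "" ∧ t.getD (k+1) "" = t.getD (k+2) "") :=
      ⟨fun ⟨u, v⟩ => ⟨u.symm, v⟩, fun ⟨u, v⟩ => ⟨u.symm, v⟩⟩
    have hstep : (if t.getD (k+1) "" = t.getD k "" ∧ t.getD (k+1) "" = t.getD (k+2) ""
        then acc else acc ++ [t.getD (k+1) ""])
        = acc ++ (if t.getD k "" = t.getD (k+1) "" ∧ t.getD (k+1) "" = t.getD (k+2) ""
          then [] else [t.getD (k+1) ""]) := by
      rw [if_congr hiff rfl rfl]; split_ifs <;> simp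
    rw [hstep]
    rw [show ((k + 2 : Nat) : Int) = ((k + 1 : Nat) : Int) + 1 by push_cast; ring]
    rw [ih (k+1) _ (by omega)]
    rw [List.drop_eq_getElem_cons h1, List.drop_eq_getElem_cons h2]
    simp [selAux, h1, h2]

theorem selAux_run (xs : List String) (x : String) :
    selAux x xs =
      (if (xs.takeWhile (fun y => y == x)).length = 0 then [] else [x]) ++
      selAux x (xs.dropWhile (fun y => y == x)) := by
  induction xs with
  | nil => simp [selAux]
  | cons c t ih =>
    by_cases hc : c = x
    · rw [List.takeWhile_cons, List.dropWhile_cons]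
      simp only [hc, beq_self_eq_true, if_true, List.length_cons]
      simp only [Nat.succ_ne_zero, if_false]
      subst hc
      cases t with
      | nil => simp [selAux]
      | cons d t' =>
        by_cases hd : d = c
        · have h1 : selAux c (c :: d :: t') = selAux c (d :: t') := by
            simp [selAux, hd]
          rw [h1, ih, hd]
          rw [List.takeWhile_cons, List.dropWhile_cons]
          simp
        · have h1 : selAux c (c :: d :: t') = [c] ++ selAux c (d :: t') := by
            simp [selAux, Ne.symm hd]
          rw [h1]
          rw [List.dropWhile_cons]
          simp [hd]
    · rw [List.takeWhile_cons, List.dropWhile_cons]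
      simp [hc]

theorem dropWhile_head_false (p : String → Bool) (l : List String) (b : String) (l' : List String)
    (h : l.dropWhile p = b :: l') : p b = false := by
  have hne : l.dropWhile p ≠ [] := by simp [h]
  have := List.head_dropWhile_not p hne
  simp only [h, List.head_cons] at this
  exact this

-- joining the kept elements equals joining the capped runs (fuel = list length)
theorem bridgeB : ∀ (n : Nat) (xs : List String), xs.length ≤ n → ∀ (a : String),
    PySem.Str.join "" (a :: selAux a xs) = PySem.Str.join "" (fancyRuns (a :: xs)) := by
  intro n
  induction n with
  | zero =>
    intro xs hx a
    have : xs = [] := List.length_eq_zero_iff.mp (Nat.le_zero.mp hx)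
    subst this
    simp [selAux, fancyRuns, strMul, joinS_cons, joinS_nil, String.append_empty]
  | succ n ih =>
    intro xs hx a
    have hruns : fancyRuns (a :: xs) =
        strMul a (min 2 (1 + (xs.takeWhile (fun y => y == a)).length)) ::
        fancyRuns (xs.dropWhile (fun y => y == a)) := by
      rw [fancyRuns]
    rw [hruns, selAux_run xs a]
    set k := (xs.takeWhile (fun y => y == a)).length with hk
    set rest := xs.dropWhile (fun y => y == a) with hrest
    have hrestlen : rest.length ≤ xs.length := List.length_dropWhile_le _ _
    have hsub : PySem.Str.join "" (selAux a rest) = PySem.Str.join "" (fancyRuns rest) := by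
      cases hre : rest with
      | nil => simp [selAux, fancyRuns]
      | cons y ys =>
        have hy : (y == a) = false := dropWhile_head_false _ xs y ys (by rw [← hrest, hre])
        have hya : ¬ a = y := by
          intro hh; rw [hh] at hy; simp at hy
        have hsel : selAux a (y :: ys) = [y] ++ selAux y ys := by
          cases ys with
          | nil => simp [selAux]
          | cons z zs =>
              simp only [selAux]
              rw [if_neg (by tauto)]
        have hlen : ys.length ≤ n := by
          have : rest.length ≤ n + 1 := le_trans hrestlen hx
          rw [hre] at this; simp at this; omega
        rw [hsel]
        calc PySem.Str.join "" ([y] ++ selAux y ys)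
            = PySem.Str.join "" (y :: selAux y ys) := by simp
          _ = PySem.Str.join "" (fancyRuns (y :: ys)) := ih ys hlen y
    by_cases hk0 : k = 0
    · have hone : strMul a (min 2 (1 + k)) = a := by
        rw [hk0]
        simp [strMul, joinS_cons, joinS_nil, String.append_empty]
      rw [if_pos hk0, List.nil_append, joinS_cons, joinS_cons, hsub, hone]
    · have hmin : min 2 (1 + k) = 2 := by omega
      simp only [hk0, if_false, hmin]
      rw [joinS_cons, joinS_append, joinS_cons, joinS_nil, hsub, joinS_cons]
      have : strMul a 2 = a ++ a := by
        apply String.toList_inj.mp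
        simp [strMul, PySem.Str.toList_join, PySem.Chars.join, List.intercalate]
      rw [this, String.append_empty, ← String.append_assoc]

-- ===== VERDICT (by name: the statement is the Claim_ definition above) =====
theorem fancy_spec : Claim_equal_fancy := by
  intro text _
  unfold Spec_fancy fancy fancy_alt
  by_cases h3 : text.length < 3
  · simp [h3]
  · simp only [h3, if_false]
    match text, h3 with
    | a :: xs, h3 =>
      have hlen : (a :: xs).length = 0 + 2 + ((a :: xs).length - 2) := by
        simp at h3; simp; omega
      have hl := loopA (a :: xs) ((a :: xs).length - 2) 0 [PySem.List.pyGetD (a :: xs) 0 ""] hlen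
      simp only [Int.ofNat_zero] at hl
      norm_num at hl ⊢
      rw [hl]
      simpa [PySem.List.pyGetD_zero_cons] using bridgeB xs.length xs le_rfl a
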